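-- pv_equiv track=rewrite | github.com/JungYoonShin/new_algorithm | 프로그래머스/1/64061. 크레인 인형뽑기 게임/크레인 인형뽑기 게임.py | solution
-- ===== SOURCE A (Python) =====
-- def solution(board, moves):
--     answer = 0
--
--     bowl = []
--
--     board = list(map(list, zip(*board[::-1])))
--     n = len(board)
--     for i in range(n):
--         while board[i] and board[i][-1] == 0:
--             board[i].pop()
--
--
--     for move in moves:
--         if not board[move-1]:
--             continue
--
--         bowl.append(board[move-1].pop())
--
--         if len(bowl) == 1:
--             continue
--
--         if bowl[-1] == bowl[-2]:
--             bowl.pop()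
--             bowl.pop()
--             answer += 2
--
--     return answer
-- ===== SOURCE B (Python) =====
-- def solution(board, moves):
--     # Pointer-per-column over the original row-major board; no transpose, no board copy/mutation.
--     answer = 0
--     nrows = len(board)
--     ncols = min((len(r) for r in board), default=0)
--     top = []                      # top[c] = row index of the topmost remaining cell in column c
--     for c in range(ncols):
--         r = 0
--         while r < nrows and board[r][c] == 0:
--             r += 1
--         top.append(r)
--     bowl = []
--     for m in moves:
--         c = m - 1
--         r = top[c]
--         if r >= nrows:
--             continue
--         bowl.append(board[r][c])
--         top[c] = r + 1
--         if len(bowl) >= 2 and bowl[-1] == bowl[-2]: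
--             bowl.pop()
--             bowl.pop()
--             answer += 2
--     return answer
-- ===== Notes on version B (the rewrite author's own statement) =====
-- stated objective: alternative
-- what changed: B drops A's reverse-zip transpose and mutable column stacks entirely: it keeps the board untouched in row-major form and maintains one per-column row pointer (initialised by scanning past the leading zeros of each column), advancing the pointer instead of popping.
-- outside the precondition, e.g. on solution([[1, 2], [1]], [0, 0]): A returns 2, B returns 0
import Mathlib
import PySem

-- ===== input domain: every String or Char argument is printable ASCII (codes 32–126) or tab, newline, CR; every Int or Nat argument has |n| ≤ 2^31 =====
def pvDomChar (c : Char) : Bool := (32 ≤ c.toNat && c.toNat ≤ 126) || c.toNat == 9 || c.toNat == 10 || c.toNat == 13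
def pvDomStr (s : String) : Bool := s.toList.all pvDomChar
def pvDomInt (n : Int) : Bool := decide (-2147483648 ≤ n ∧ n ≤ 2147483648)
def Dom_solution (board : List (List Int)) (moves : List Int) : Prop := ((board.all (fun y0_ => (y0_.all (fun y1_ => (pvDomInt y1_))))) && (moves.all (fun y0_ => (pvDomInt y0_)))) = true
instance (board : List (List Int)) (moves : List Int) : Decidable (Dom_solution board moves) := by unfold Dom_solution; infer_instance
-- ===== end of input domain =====

-- B replaces A's reverse-zip transpose and mutable column stacks by per-column row pointers
-- over the untouched row-major board (alternative decomposition, similar cost).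
-- Neither implementation mutates its arguments.

-- ===== PORT A =====
-- zip(*rows): truncates to the shortest row; zip() of no iterables is empty
def zipStar (rows : List (List Int)) : List (List Int) :=
  match rows with
  | [] => []
  | r :: rest =>
    if h : ((r :: rest).any (fun x => x.isEmpty)) then []
    else ((r :: rest).map (fun x => x.headD 0)) :: zipStar ((r :: rest).map (fun x => x.tail))
termination_by (rows.headD []).length
decreasing_by
  simp only [List.map_cons, List.headD_cons]
  simp only [List.any_cons, Bool.or_eq_true, List.isEmpty_iff, not_or] at h
  cases r with
  | nil => exact absurd rfl h.1
  | cons a t => simp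

-- while board[i] and board[i][-1] == 0: board[i].pop()
def popZeros (l : List Int) : List Int :=
  if h : l.getLast? = some 0 then popZeros l.dropLast else l
termination_by l.length
decreasing_by
  cases l with
  | nil => simp at h
  | cons a t => simp

-- the shared bowl update: append v; if the top two are equal pop both and add 2
def pushBowl (bowl : List Int) (ans : Int) (v : Int) : List Int × Int :=
  match bowl with
  | [] => ([v], ans)
  | b :: rest => if v = b then (rest, ans + 2) else (v :: b :: rest, ans)

-- one iteration of A's move loop over (column stacks, bowl, answer)
def stepA (st : List (List Int) × List Int × Int) (m : Int) : List (List Int) × List Int × Int :=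
  let col := PySem.List.pyGetD st.1 (m - 1) []   -- board[move-1]; in range under Pre_
  if col.isEmpty then st
  else
    let v := col.getLast?.getD 0                 -- board[move-1].pop()
    let p := pushBowl st.2.1 st.2.2 v
    (PySem.List.pySetD st.1 (m - 1) col.dropLast, p.1, p.2)

def solution (board : List (List Int)) (moves : List Int) : Int :=
  let cols := (zipStar board.reverse).map popZeros   -- transpose of reversed rows, top zeros trimmed
  (moves.foldl stepA (cols, ([] : List Int), (0 : Int))).2.2

-- ===== PORT B =====
-- min((len(r) for r in board), default=0)
def minW (board : List (List Int)) : Nat := ((board.map (fun r => r.length)).min?).getD 0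

-- r = 0; while r < nrows and board[r][c] == 0: r += 1
def scanTop (rows : List (List Int)) (c : Nat) : Nat :=
  match rows with
  | [] => 0
  | row :: rest => if row.getD c 0 = 0 then scanTop rest c + 1 else 0

-- one iteration of B's move loop over (row pointers, bowl, answer)
def stepB (board : List (List Int)) (st : List Nat × List Int × Int) (m : Int) : List Nat × List Int × Int :=
  let r := PySem.List.pyGetD st.1 (m - 1) 0      -- top[m-1]; in range under Pre_
  if board.length ≤ r then st
  else
    let v := PySem.List.pyGetD (board.getD r []) (m - 1) 0   -- board[r][m-1]
    let p := pushBowl st.2.1 st.2.2 v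
    (PySem.List.pySetD st.1 (m - 1) (r + 1), p.1, p.2)

def solution_alt (board : List (List Int)) (moves : List Int) : Int :=
  let top := (List.range (minW board)).map (fun c => scanTop board c)
  (moves.foldl (stepB board) (top, ([] : List Int), (0 : Int))).2.2

-- ===== PRECONDITION & SPEC =====
-- Pre_ excludes moves outside [1-W, W] (W = shortest row length), where A raises IndexError,
-- and the combination of a ragged board with a non-positive move, where A's negative index wraps
-- on the zip-truncated column list while B's wraps on the individual row — a Python
-- negative-index-wraparound corner on which both values are accidental.
def Pre_solution (board : List (List Int)) (moves : List Int) : Prop :=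
  (∀ m ∈ moves, 1 - (minW board : Int) ≤ m ∧ m ≤ (minW board : Int)) ∧
  ((∀ row ∈ board, row.length = minW board) ∨ (∀ m ∈ moves, 1 ≤ m))
instance (board : List (List Int)) (moves : List Int) : Decidable (Pre_solution board moves) := by unfold Pre_solution; infer_instance

def pvWitness_solution : List (List Int) × List Int := ([[0, 0], [1, 2]], [1, 2, 1])

def Spec_solution (board : List (List Int)) (moves : List Int) (out : Int) : Prop := out = solution_alt board moves
instance (board : List (List Int)) (moves : List Int) (out : Int) : Decidable (Spec_solution board moves out) := by unfold Spec_solution; infer_instance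

-- ===== CLAIM (what is proved, stated in full; the proofs are below) =====
def Claim_equal_solution : Prop := ∀ (board : List (List Int)) (moves : List Int), Dom_solution board moves → Pre_solution board moves → Spec_solution board moves (solution board moves)

-- ===== LEMMAS AND PROOFS =====

-- the column of the board at index c, top row first
def colT (board : List (List Int)) (c : Nat) : List Int := board.map (fun r => r.getD c 0)

-- Python's resolved index for i on a list of length n (defined only when -n ≤ i < n)
def eIdx (n : Nat) (i : Int) : Nat := (if i < 0 then i + n else i).toNat

lemma pyGetD_resolve {α : Type} (xs : List α) (i : Int) (d : α)
    (h1 : -(xs.length : Int) ≤ i) (h2 : i < xs.length) :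
    PySem.List.pyGetD xs i d = xs.getD (eIdx xs.length i) d := by
  simp only [PySem.List.pyGetD, PySem.List.pyGet?, PySem.List.pyIdx?, eIdx]
  by_cases h0 : 0 ≤ i
  · simp [h0, h2, not_lt.mpr h0, List.getD_eq_getElem?_getD]
  · have hneg : i < 0 := not_le.mp h0
    have he : (i + (xs.length : Int)).toNat = xs.length - (-i).toNat := by omega
    simp [h0, h1, hneg, he, List.getD_eq_getElem?_getD]

lemma pySetD_resolve {α : Type} (xs : List α) (i : Int) (v : α)
    (h1 : -(xs.length : Int) ≤ i) (h2 : i < xs.length) :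
    PySem.List.pySetD xs i v = xs.set (eIdx xs.length i) v := by
  simp only [PySem.List.pySetD, PySem.List.pySet?, PySem.List.pyIdx?, eIdx]
  by_cases h0 : 0 ≤ i
  · simp [h0, h2, not_lt.mpr h0]
  · have hneg : i < 0 := not_le.mp h0
    have he : (i + (xs.length : Int)).toNat = xs.length - (-i).toNat := by omega
    simp [h0, h1, hneg, he]

lemma zipStar_length (rows : List (List Int)) :
    (zipStar rows).length = ((rows.map (fun r => r.length)).min?).getD 0 := by
  fun_induction zipStar rows with
  | case1 => simp
  | case2 r rest h =>
    -- some row is empty: the min of the lengths is 0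
    simp only [List.any_eq_true, List.isEmpty_iff] at h
    obtain ⟨x, hx, hxe⟩ := h
    have hmem : (0 : Nat) ∈ (r :: rest).map (fun r => r.length) := by
      exact List.mem_map.mpr ⟨x, hx, by simp [hxe]⟩
    rcases hmin : ((r :: rest).map (fun r => r.length)).min? with _ | m
    · simp [List.min?_eq_none_iff] at hmin
    · have := (List.min?_eq_some_iff.mp hmin).2 0 hmem
      rw [hmin]
      simp
      omega
  | case3 r rest h ih =>
    simp only [List.any_eq_true, List.isEmpty_iff] at h
    push Not at h
    -- all rows nonempty: min of tail lengths = min of lengths - 1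
    rcases hmin : ((r :: rest).map (fun r => r.length)).min? with _ | m
    · simp [List.min?_eq_none_iff] at hmin
    · obtain ⟨hm_mem, hm_le⟩ := List.min?_eq_some_iff.mp hmin
      have hmin' : (((r :: rest).map (fun x => x.tail)).map (fun r => r.length)).min? = some (m - 1) := by
        apply List.min?_eq_some_iff.mpr
        constructor
        · simp only [List.map_map, List.mem_map] at hm_mem ⊢
          obtain ⟨x, hx, hxl⟩ := hm_mem
          exact ⟨x, hx, by simp [List.length_tail, hxl]⟩
        · intro b hb
          simp only [List.map_map, List.mem_map] at hb
          obtain ⟨x, hx, hxl⟩ := hb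
          have := hm_le x.length (List.mem_map.mpr ⟨x, hx, rfl⟩)
          have hxne : x ≠ [] := h x hx
          have : 1 ≤ x.length := List.length_pos_iff.mpr hxne
          have hxl' : x.length - 1 = b := by simpa [List.length_tail] using hxl
          omega
      have hm1 : 1 ≤ m := by
        obtain ⟨x, hx, hxl⟩ := List.mem_map.mp hm_mem
        have hxne : x ≠ [] := h x hx
        have : 1 ≤ x.length := List.length_pos_iff.mpr hxne
        omega
      rw [List.length_cons, ih, hmin', hmin]
      simp only [Option.getD_some]
      omega

lemma zipStar_getD (rows : List (List Int)) (c : Nat) (hc : c < (zipStar rows).length) :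
    (zipStar rows).getD c [] = rows.map (fun r => r.getD c 0) := by
  induction rows using zipStar.induct generalizing c with
  | case1 => rw [zipStar.eq_1] at hc; exact absurd hc (by simp)
  | case2 r rest h => rw [zipStar.eq_2, dif_pos h] at hc; exact absurd hc (by simp)
  | case3 r rest h ih =>
    rw [zipStar.eq_2, dif_neg h] at hc ⊢
    simp only [List.any_eq_true, List.isEmpty_iff] at h
    push Not at h
    cases c with
    | zero =>
      simp only [List.getD_cons_zero]
      apply List.map_congr_left
      intro x hx
      rcases List.exists_cons_of_ne_nil (h x hx) with ⟨a, t, rfl⟩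
      simp
    | succ c =>
      simp only [List.getD_cons_succ, List.length_cons] at hc ⊢
      rw [ih c (by omega)]
      simp only [List.map_map]
      apply List.map_congr_left
      intro x hx
      rcases List.exists_cons_of_ne_nil (h x hx) with ⟨a, t, rfl⟩
      simp

lemma popZeros_eq (l : List Int) :
    popZeros l = (l.reverse.dropWhile (fun x => x == 0)).reverse := by
  fun_induction popZeros l with
  | case1 l h ih =>
    have hne : l ≠ [] := by intro e; subst e; simp at h
    have hl : l = l.dropLast ++ [0] := by
      conv_lhs => rw [← List.dropLast_concat_getLast hne]
      rw [List.getLast_eq_iff_getLast?_eq_some hne |>.mpr h]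
    rw [ih]
    conv_rhs => rw [hl]
    simp
  | case2 l h =>
    rcases l.eq_nil_or_concat with rfl | ⟨t, a, rfl⟩
    · simp
    · have ha : a ≠ 0 := by
        intro e; subst e; simp at h
      simp [List.dropWhile_cons, ha]

lemma scanTop_eq (rows : List (List Int)) (c : Nat) :
    scanTop rows c = ((rows.map (fun r => r.getD c 0)).takeWhile (fun x => x == 0)).length := by
  induction rows with
  | nil => simp [scanTop]
  | cons row rest ih =>
    simp only [scanTop, List.map_cons, List.takeWhile_cons]
    by_cases h : row.getD c 0 = 0
    · rw [if_pos h, if_pos (by simp only [beq_iff_eq]; exact h), ih]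
      simp
    · rw [if_neg h, if_neg (by simpa using h)]
      simp

lemma dropWhile_eq_drop {α : Type} (p : α → Bool) (l : List α) :
    l.dropWhile p = l.drop (l.takeWhile p).length := by
  induction l with
  | nil => simp
  | cons a l ih =>
    by_cases h : p a
    · simp [List.dropWhile_cons, List.takeWhile_cons, h, ih]
    · simp [List.dropWhile_cons, List.takeWhile_cons, h]

lemma minW_reverse (board : List (List Int)) : minW board.reverse = minW board := by
  unfold minW
  rcases hmin : (board.map (fun r => r.length)).min? with _ | m
  · rw [List.min?_eq_none_iff] at hmin
    simp_all
  · obtain ⟨hmem, hle⟩ := List.min?_eq_some_iff.mp hmin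
    have : (board.reverse.map (fun r => r.length)).min? = some m := by
      apply List.min?_eq_some_iff.mpr
      simp only [List.map_reverse, List.mem_reverse]
      exact ⟨hmem, hle⟩
    rw [List.map_reverse] at this
    simp [this, hmin]

lemma minW_le (board : List (List Int)) (row : List Int) (h : row ∈ board) :
    minW board ≤ row.length := by
  unfold minW
  rcases hmin : (board.map (fun r => r.length)).min? with _ | m
  · rw [List.min?_eq_none_iff] at hmin; simp_all
  · rw [hmin]
    simpa using (List.min?_eq_some_iff.mp hmin).2 row.length (List.mem_map.mpr ⟨row, h, rfl⟩)

-- the simulation invariant between A's column stacks and B's row pointers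
def SimInv (board : List (List Int)) (cols : List (List Int)) (top : List Nat) : Prop :=
  cols.length = minW board ∧ top.length = minW board ∧
  ∀ c, c < minW board → top.getD c 0 ≤ board.length ∧
    cols.getD c [] = ((colT board c).drop (top.getD c 0)).reverse

lemma step_sim (board : List (List Int)) (cols : List (List Int)) (top : List Nat)
    (bowl : List Int) (ans : Int) (m : Int)
    (hrect : (∀ row ∈ board, row.length = minW board) ∨ 1 ≤ m)
    (hm1 : 1 - (minW board : Int) ≤ m) (hm2 : m ≤ (minW board : Int))
    (hI : SimInv board cols top) :
    (stepA (cols, bowl, ans) m).2 = (stepB board (top, bowl, ans) m).2 ∧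
      SimInv board (stepA (cols, bowl, ans) m).1 (stepB board (top, bowl, ans) m).1 := by
  obtain ⟨hlenA, hlenB, hcols⟩ := hI
  have hW : 0 < minW board := by omega
  set W := minW board with hWdef
  set j := eIdx W (m - 1) with hjdef
  have hj : j < W := by rw [hjdef]; unfold eIdx; split <;> omega
  have hgA : PySem.List.pyGetD cols (m - 1) [] = cols.getD j [] := by
    rw [pyGetD_resolve cols (m - 1) [] (by rw [hlenA]; omega) (by rw [hlenA]; omega), hlenA]
  have hgB : PySem.List.pyGetD top (m - 1) 0 = top.getD j 0 := by
    rw [pyGetD_resolve top (m - 1) 0 (by rw [hlenB]; omega) (by rw [hlenB]; omega), hlenB]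
  have hsA : PySem.List.pySetD cols (m - 1) = cols.set j := by
    funext v
    rw [pySetD_resolve cols (m - 1) v (by rw [hlenA]; omega) (by rw [hlenA]; omega), hlenA]
  have hsB : PySem.List.pySetD top (m - 1) = top.set j := by
    funext v
    rw [pySetD_resolve top (m - 1) v (by rw [hlenB]; omega) (by rw [hlenB]; omega), hlenB]
  obtain ⟨htle, hcol⟩ := hcols j hj
  set t := top.getD j 0 with htdef
  have hcolTlen : (colT board j).length = board.length := by simp [colT]
  simp only [stepA, stepB, hgA, hgB, hsA, hsB]
  by_cases hend : board.length ≤ t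
  · have hdrop : (colT board j).drop t = [] := by
      rw [List.drop_eq_nil_iff]; omega
    rw [hcol, hdrop]
    simp only [List.reverse_nil, List.isEmpty_nil, if_pos hend, if_pos rfl]
    exact ⟨rfl, hlenA, hlenB, hcols⟩
  · push Not at hend
    have htlt : t < (colT board j).length := by omega
    have hdrop : (colT board j).drop t = (colT board j)[t] :: (colT board j).drop (t + 1) :=
      (List.getElem_cons_drop htlt).symm
    have hcolne : ¬(((colT board j).drop t).reverse).isEmpty = true := by
      simp
      omega
    have hrev : ((colT board j).drop t).reverse
        = ((colT board j).drop (t + 1)).reverse ++ [(colT board j)[t]] := by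
      rw [hdrop]; simp
    -- the value A pops
    have hlastA : (((colT board j).drop t).reverse).getLast?.getD 0 = (colT board j)[t] := by
      rw [hrev]; simp
    have hdropLast : (((colT board j).drop t).reverse).dropLast
        = ((colT board j).drop (t + 1)).reverse := by
      rw [hrev, List.dropLast_concat]
    -- the value B reads
    have hrowmem : board.getD t [] ∈ board := by
      rw [List.getD_eq_getElem board [] hend]
      exact List.getElem_mem hend
    have hWle : W ≤ (board.getD t []).length := minW_le board _ hrowmem
    have hvB : PySem.List.pyGetD (board.getD t []) (m - 1) 0
        = (board.getD t []).getD j 0 := by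
      rcases hrect with hrect | hpos
      · have hrl : (board.getD t []).length = W := hrect _ hrowmem
        rw [pyGetD_resolve _ (m - 1) 0 (by rw [hrl]; omega) (by rw [hrl]; omega), hrl]
      · have h0 : (0 : Int) ≤ m - 1 := by omega
        have hj2 : j = (m - 1).toNat := by rw [hjdef]; unfold eIdx; split <;> omega
        have hlt : m - 1 < ((board.getD t []).length : Int) := by omega
        have he : eIdx (board.getD t []).length (m - 1) = j := by
          rw [hj2]; unfold eIdx; split <;> omega
        rw [pyGetD_resolve _ (m - 1) 0 (by omega) hlt, he]
    have hvals : (colT board j)[t] = (board.getD t []).getD j 0 := by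
      have : (colT board j)[t] = (board[t]'hend).getD j 0 := by
        simp [colT]
      rw [this, List.getD_eq_getElem board [] hend]
    rw [hcol]
    simp only [if_neg hcolne, if_neg (by omega : ¬ board.length ≤ t), hlastA, hvB, ← hvals,
      hdropLast]
    refine ⟨by trivial, ?_, ?_, ?_⟩
    · rw [List.length_set, hlenA]
    · rw [List.length_set, hlenB]
    · intro c hc
      by_cases hcj : c = j
      · subst hcj
        constructor
        · rw [List.getD_eq_getElem _ 0 (by simp [hlenB]; omega), List.getElem_set_self]
          omega
        · rw [List.getD_eq_getElem _ [] (by simp [hlenA]; omega), List.getElem_set_self,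
            List.getD_eq_getElem _ 0 (by simp [hlenB]; omega), List.getElem_set_self]
      · obtain ⟨h1, h2⟩ := hcols c hc
        have e1 : (top.set j (t + 1)).getD c 0 = top.getD c 0 := by
          rw [List.getD_eq_getElem?_getD, List.getElem?_set_ne (by omega),
            ← List.getD_eq_getElem?_getD]
        have e2 : (cols.set j ((colT board j).drop (t + 1)).reverse).getD c [] = cols.getD c [] := by
          rw [List.getD_eq_getElem?_getD, List.getElem?_set_ne (by omega),
            ← List.getD_eq_getElem?_getD]
        constructor
        · rw [e1]; exact h1
        · rw [e1, e2]; exact h2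

lemma fold_sim (board : List (List Int)) (moves : List Int) (cols : List (List Int))
    (top : List Nat) (bowl : List Int) (ans : Int)
    (hpre : ∀ m ∈ moves, 1 - (minW board : Int) ≤ m ∧ m ≤ (minW board : Int))
    (hrect : (∀ row ∈ board, row.length = minW board) ∨ (∀ m ∈ moves, 1 ≤ m))
    (hI : SimInv board cols top) :
    (moves.foldl stepA (cols, bowl, ans)).2 = (moves.foldl (stepB board) (top, bowl, ans)).2 := by
  induction moves generalizing cols top bowl ans with
  | nil => rfl
  | cons m ms ih =>
    have hm := hpre m (List.mem_cons_self)
    have hr : (∀ row ∈ board, row.length = minW board) ∨ 1 ≤ m := by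
      rcases hrect with h | h
      · exact Or.inl h
      · exact Or.inr (h m List.mem_cons_self)
    obtain ⟨hp, hinv⟩ := step_sim board cols top bowl ans m hr hm.1 hm.2 hI
    rw [List.foldl_cons, List.foldl_cons]
    have heA : stepA (cols, bowl, ans) m
        = ((stepA (cols, bowl, ans) m).1, (stepB board (top, bowl, ans) m).2.1,
           (stepB board (top, bowl, ans) m).2.2) := by
      rw [← hp]
    have heB : stepB board (top, bowl, ans) m
        = ((stepB board (top, bowl, ans) m).1, (stepB board (top, bowl, ans) m).2.1,
           (stepB board (top, bowl, ans) m).2.2) := rfl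
    rw [heA, heB]
    exact ih _ _ _ _ (fun x hx => hpre x (List.mem_cons_of_mem m hx))
      (by rcases hrect with h | h
          · exact Or.inl h
          · exact Or.inr (fun x hx => h x (List.mem_cons_of_mem m hx))) hinv

lemma init_inv (board : List (List Int)) :
    SimInv board ((zipStar board.reverse).map popZeros)
      ((List.range (minW board)).map (fun c => scanTop board c)) := by
  have hzl : (zipStar board.reverse).length = minW board := by
    rw [zipStar_length]
    have : minW board.reverse = minW board := minW_reverse board
    unfold minW at this
    simpa using this
  refine ⟨by simpa using hzl, by simp, ?_⟩
  intro c hc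
  have htop : ((List.range (minW board)).map (fun c => scanTop board c)).getD c 0
      = scanTop board c := by
    rw [List.getD_eq_getElem _ 0 (by simpa using hc)]
    simp
  have hscan : scanTop board c = ((colT board c).takeWhile (fun x => x == 0)).length := by
    rw [scanTop_eq]; rfl
  constructor
  · rw [htop, hscan]
    have h1 : ((colT board c).takeWhile (fun x => x == 0)).length ≤ (colT board c).length :=
      (List.takeWhile_sublist _).length_le
    simpa [colT] using h1
  · rw [htop]
    have hc' : c < (zipStar board.reverse).length := by rw [hzl]; exact hc
    have hcols0 : ((zipStar board.reverse).map popZeros).getD c []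
        = popZeros ((zipStar board.reverse).getD c []) := by
      rw [List.getD_eq_getElem _ [] (by simpa using hc'), List.getD_eq_getElem _ [] hc']
      simp
    rw [hcols0, zipStar_getD board.reverse c hc', popZeros_eq]
    have hrev : (board.reverse.map (fun r => r.getD c 0)) = (colT board c).reverse := by
      simp [colT]
    rw [hrev, List.reverse_reverse, dropWhile_eq_drop, ← hscan]

-- ===== VERDICT (by name: the statement is the Claim_ definition above) =====
theorem solution_spec : Claim_equal_solution := by
  intro board moves _ hpre
  unfold Spec_solution solution solution_alt
  have h := fold_sim board moves ((zipStar board.reverse).map popZeros)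
    ((List.range (minW board)).map (fun c => scanTop board c)) [] 0
    hpre.1 (hpre.2.imp id id) (init_inv board)
  simpa using congrArg Prod.snd h
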